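-- pv_equiv track=rewrite | github.com/laxmigudami/PythonPractice | Python_Prgs_for_interviews/strings/replaceDuplicatesWithWhiteSpace.py | replace_duplicate
-- ===== SOURCE A (Python) =====
-- def replace_duplicate(string):
--     temp = ""
--     for i in string:
--         if i not in temp:
--             temp += i
--         else:
--             temp += " "
--     return temp
-- ===== SOURCE B (Python) =====
-- def replace_duplicate(string):
--     first = {}
--     for i, c in enumerate(string):
--         if c not in first:
--             first[c] = i
--     return ''.join(c if first[c] == i else ' ' for i, c in enumerate(string))
-- ===== Notes on version B (the rewrite author's own statement) =====
-- stated objective: alternative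
-- what changed: B replaces A's single incremental loop (membership test against the output built so far) with a two-pass scheme: first build a dict of each character's first-occurrence index, then emit each character, or a space, by comparing its position with that first index.
import Mathlib
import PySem

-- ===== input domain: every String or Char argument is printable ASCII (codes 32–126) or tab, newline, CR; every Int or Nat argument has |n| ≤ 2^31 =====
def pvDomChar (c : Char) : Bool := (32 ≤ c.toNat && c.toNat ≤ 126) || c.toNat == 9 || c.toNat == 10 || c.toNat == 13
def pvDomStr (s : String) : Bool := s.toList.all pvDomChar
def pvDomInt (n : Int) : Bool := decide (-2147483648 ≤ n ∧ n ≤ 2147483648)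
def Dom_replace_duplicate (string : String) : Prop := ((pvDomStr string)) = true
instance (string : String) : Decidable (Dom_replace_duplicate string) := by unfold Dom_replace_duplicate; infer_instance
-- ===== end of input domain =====

-- B replaces A's single incremental loop (membership test against the output built so far) with a
-- two-pass scheme: a first-occurrence-index dict, then a positional pass (objective: alternative).

-- ===== PORT A =====
-- the loop 'for i in string: temp += i if i not in temp else " "'
-- ('i not in temp' on a 1-char string is exactly char membership in temp's characters)
def pvALoop (temp : List Char) : List Char → List Char
  | [] => temp
  | c :: rest => pvALoop (temp ++ [if c ∈ temp then ' ' else c]) rest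

def replace_duplicate (string : String) : String :=
  String.mk (pvALoop [] string.toList)

-- ===== PORT B =====
-- first pass: 'for i, c in enumerate(string): if c not in first: first[c] = i'
def pvBBuild (d : PySem.Dict Char Int) (k : Int) : List Char → PySem.Dict Char Int
  | [] => d
  | c :: rest => pvBBuild (if d.contains c then d else d.insert c k) (k + 1) rest

-- second pass: ''.join(c if first[c] == i else ' ' for i, c in enumerate(string))
-- (every c of the string is a key of first, so first[c] is first.getD c _; -1 is never a stored index)
def pvBOut (d : PySem.Dict Char Int) (k : Int) : List Char → List Char
  | [] => []
  | c :: rest => (if d.getD c (-1) = k then c else ' ') :: pvBOut d (k + 1) rest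

def replace_duplicate_alt (string : String) : String :=
  String.mk (pvBOut (pvBBuild PySem.Dict.empty 0 string.toList) 0 string.toList)

-- ===== PRECONDITION & SPEC =====
def Spec_replace_duplicate (string : String) (out : String) : Prop := out = replace_duplicate_alt string
instance (string : String) (out : String) : Decidable (Spec_replace_duplicate string out) := by unfold Spec_replace_duplicate; infer_instance

-- ===== CLAIM (what is proved, stated in full; the proofs are below) =====
def Claim_equal_replace_duplicate : Prop := ∀ (string : String), Dom_replace_duplicate string → Spec_replace_duplicate string (replace_duplicate string)

-- ===== LEMMAS AND PROOFS =====

-- the dict built by B's first pass looks up the (k-offset) index of the first occurrence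
lemma pvBBuild_get? (l : List Char) (d : PySem.Dict Char Int) (k : Int) (c : Char) :
    (pvBBuild d k l).get? c
      = (d.get? c).or ((PySem.List.index? l c).map (fun j => k + (j : Int))) := by
  induction l generalizing d k with
  | nil => simp [pvBBuild, PySem.List.index?]
  | cons c0 rest ih =>
    simp only [pvBBuild]
    rw [ih]
    by_cases hc : c0 = c
    · subst hc
      rw [PySem.List.index?_cons_self]
      by_cases hcon : d.contains c0
      · have hs : (d.get? c0).isSome = true := by
          rw [← PySem.Dict.contains_eq_isSome_get? d c0]; exact hcon
        obtain ⟨v, hv⟩ := Option.isSome_iff_exists.mp hs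
        simp [hcon, hv]
      · have hget : d.get? c0 = none :=
          (PySem.Dict.get?_eq_none_iff_contains d c0).mpr (by simpa using hcon)
        simp [hcon, hget, PySem.Dict.get?_insert_self]
    · rw [PySem.List.index?_cons_of_ne rest hc]
      have hd : (if d.contains c0 then d else d.insert c0 k).get? c = d.get? c := by
        split
        · rfl
        · exact PySem.Dict.get?_insert_of_ne d k (fun h => hc h.symm)
      rw [hd]
      cases hg : d.get? c with
      | some v => simp
      | none =>
        cases h : PySem.List.index? rest c with
        | none => simp
        | some j =>
          simp
          omega

-- at position seen.length of seen ++ c :: rest, the stored first index equals seen.length iff c is new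
lemma pvBBuild_getD_pos (seen rest : List Char) (c : Char) :
    ((pvBBuild PySem.Dict.empty 0 (seen ++ c :: rest)).getD c (-1) = (seen.length : Int))
      ↔ c ∉ seen := by
  rw [PySem.Dict.getD_eq_get?_getD, pvBBuild_get?]
  simp only [PySem.Dict.get?_empty, Option.none_or]
  constructor
  · intro h hmem
    rw [PySem.List.index?_append_of_mem (c :: rest) hmem] at h
    obtain ⟨j, hj⟩ := Option.isSome_iff_exists.mp
      ((PySem.List.index?_isSome_iff seen c).mpr hmem)
    obtain ⟨pre, suf, hsplit, hlen, _⟩ := (PySem.List.index?_eq_some_iff seen c j).mp hj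
    have hjlt : j < seen.length := by
      subst hlen; rw [hsplit]; simp
    rw [hj] at h
    simp at h
    omega
  · intro hnm
    have : PySem.List.index? (seen ++ c :: rest) c = some seen.length :=
      (PySem.List.index?_eq_some_iff (seen ++ c :: rest) c seen.length).mpr
        ⟨seen, rest, rfl, rfl, hnm⟩
    rw [this]
    simp

lemma pv_main (full : List Char) :
    ∀ (l seen temp : List Char), full = seen ++ l →
      (∀ c, c ≠ ' ' → (c ∈ temp ↔ c ∈ seen)) →
      pvALoop temp l
        = temp ++ pvBOut (pvBBuild PySem.Dict.empty 0 full) (seen.length : Int) l := by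
  intro l
  induction l with
  | nil => intro seen temp _ _; simp [pvALoop, pvBOut]
  | cons c rest ih =>
    intro seen temp hfull hinv
    simp only [pvALoop, pvBOut]
    have hx : (if c ∈ temp then ' ' else c)
        = (if (pvBBuild PySem.Dict.empty 0 full).getD c (-1) = (seen.length : Int) then c else ' ') := by
      by_cases hc : c = ' '
      · subst hc; split <;> split <;> rfl
      · have hpos := pvBBuild_getD_pos seen rest c
        rw [← hfull] at hpos
        rw [if_congr (hinv c hc) rfl rfl]
        by_cases hm : c ∈ seen
        · rw [if_pos hm, if_neg (fun h => (hpos.mp h) hm)]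
        · rw [if_neg hm, if_pos (hpos.mpr hm)]
    have hstep := ih (seen ++ [c]) (temp ++ [if c ∈ temp then ' ' else c])
      (by rw [hfull]; simp)
      (by
        intro c' hc'
        simp only [List.mem_append, List.mem_singleton]
        constructor
        · rintro (h | h)
          · exact Or.inl ((hinv c' hc').mp h)
          · by_cases hm : c ∈ temp
            · rw [if_pos hm] at h; exact absurd h hc'
            · rw [if_neg hm] at h; exact Or.inr h
        · rintro (h | h)
          · exact Or.inl ((hinv c' hc').mpr h)
          · by_cases hm : c ∈ temp
            · rw [if_pos hm]
              exact Or.inl (h ▸ hm)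
            · rw [if_neg hm]; exact Or.inr h)
    rw [hstep]
    rw [hx]
    simp only [List.length_append, List.length_singleton]
    push_cast
    simp [List.append_assoc]

-- ===== VERDICT (by name: the statement is the Claim_ definition above) =====
theorem replace_duplicate_spec : Claim_equal_replace_duplicate := by
  intro s _
  unfold Spec_replace_duplicate replace_duplicate replace_duplicate_alt
  have := pv_main s.toList s.toList [] [] (by simp) (by simp)
  rw [this]
  simp
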